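-- pv_equiv track=rewrite | github.com/JohnTantillo/OH-Helper | database/MongoBase.py | cleansing
-- ===== SOURCE A (Python) =====
-- def cleansing(inputs):
--     sanitized = []
--     disable = False
--     for i in inputs:
--         indsanitized = ""
--         disable = False
--         for ind in i:
--             if ind == '<':
--                 disable = True
--             elif ind == '>':
--                 disable = False
--             elif disable == False:
--                 indsanitized = indsanitized + ind
--         sanitized.append(indsanitized)
--     return sanitized
-- ===== SOURCE B (Python) =====
-- def strip_tags(s):
--     # drop every '<...>' span (an unclosed '<' drops the rest) by jumping
--     # between brackets with str.partition instead of a per-character state flag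
--     out = []
--     while True:
--         head, sep, tail = s.partition('<')
--         out.append(head)
--         if not sep:
--             return ''.join(out)
--         _, _, s = tail.partition('>')
--
--
-- def cleansing(inputs):
--     return [''.join(c for c in strip_tags(s) if c != '>') for s in inputs]
-- ===== Notes on version B (the rewrite author's own statement) =====
-- stated objective: alternative
-- what changed: Replaces the per-character disable-flag state machine by str.partition jumps from each '<' to its closing '>' plus a single final removal of stray '>' characters.
import Mathlib
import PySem

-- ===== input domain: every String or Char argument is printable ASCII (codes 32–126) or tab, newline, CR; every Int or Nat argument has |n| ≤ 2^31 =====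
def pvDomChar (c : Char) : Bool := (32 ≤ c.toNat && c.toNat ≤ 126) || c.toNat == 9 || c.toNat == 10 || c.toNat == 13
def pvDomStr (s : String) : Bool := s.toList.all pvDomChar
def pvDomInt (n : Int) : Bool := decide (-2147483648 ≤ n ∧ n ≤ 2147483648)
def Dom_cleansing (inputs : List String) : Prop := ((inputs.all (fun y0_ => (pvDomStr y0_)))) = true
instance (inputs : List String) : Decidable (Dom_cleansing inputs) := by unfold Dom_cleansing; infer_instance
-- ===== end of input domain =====

-- B replaces A's per-character disable-flag state machine by partition-based jumps
-- between brackets plus one final filter of stray '>' characters (objective: alternative).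

-- ===== PORT A =====
-- the per-string inner loop of A: state = (accumulated chars, disable flag)
def cleansingInner (st : List Char × Bool) (ind : Char) : List Char × Bool :=
  if ind = '<' then (st.1, true)
  else if ind = '>' then (st.1, false)
  else if st.2 = false then (st.1 ++ [ind], st.2)
  else st

def cleansing (inputs : List String) : List String :=
  inputs.foldl
    (fun sanitized i =>
      sanitized ++ [String.mk (i.toList.foldl cleansingInner ([], false)).1])
    []

-- ===== PORT B =====
-- strip_tags of Source B: str.partition('<') / ('>') with a single-character separator is
-- exactly takeWhile/dropWhile (head = takeWhile (≠ sep); tail = rest after the sep,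
-- empty when sep is absent); the collected heads ''.join to the concatenation below.
def stripTags (cs : List Char) : List Char :=
  if h : cs.dropWhile (· ≠ '<') = [] then cs.takeWhile (· ≠ '<')
  else cs.takeWhile (· ≠ '<') ++
    stripTags ((((cs.dropWhile (· ≠ '<')).tail).dropWhile (· ≠ '>')).drop 1)
termination_by cs.length
decreasing_by
  have h1 : (cs.dropWhile (· ≠ '<')).length ≤ cs.length := cs.length_dropWhile_le _
  have h2 : (cs.dropWhile (· ≠ '<')).length ≠ 0 := by simpa using h
  have h3 : ((cs.dropWhile (· ≠ '<')).tail).length = (cs.dropWhile (· ≠ '<')).length - 1 :=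
    List.length_tail
  have h4 : (((cs.dropWhile (· ≠ '<')).tail).dropWhile (· ≠ '>')).length
      ≤ ((cs.dropWhile (· ≠ '<')).tail).length := List.length_dropWhile_le _ _
  have h5 : ((((cs.dropWhile (· ≠ '<')).tail).dropWhile (· ≠ '>')).drop 1).length
      = (((cs.dropWhile (· ≠ '<')).tail).dropWhile (· ≠ '>')).length - 1 := by
    simp [List.length_drop]
  omega

-- the ''.join(c for c in … if c != '>') of Source B
def cleansing_alt (inputs : List String) : List String :=
  inputs.map (fun s => String.mk ((stripTags s.toList).filter (fun c => c ≠ '>')))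

-- ===== PRECONDITION & SPEC =====
def Spec_cleansing (inputs : List String) (out : List String) : Prop := out = cleansing_alt inputs
instance (inputs : List String) (out : List String) : Decidable (Spec_cleansing inputs out) := by unfold Spec_cleansing; infer_instance

-- ===== CLAIM (what is proved, stated in full; the proofs are below) =====
def Claim_equal_cleansing : Prop := ∀ (inputs : List String), Dom_cleansing inputs → Spec_cleansing inputs (cleansing inputs)

-- ===== LEMMAS AND PROOFS =====

-- A's state machine, written as structural recursion (d = the disable flag)
def machine (d : Bool) : List Char → List Char
  | [] => []
  | c :: cs =>
      if c = '<' then machine true cs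
      else if c = '>' then machine false cs
      else if d then machine d cs
      else c :: machine d cs

lemma foldl_inner (cs : List Char) : ∀ (acc : List Char) (d : Bool),
    (cs.foldl cleansingInner (acc, d)).1 = acc ++ machine d cs := by
  induction cs with
  | nil => intro acc d; simp [machine]
  | cons c cs ih =>
      intro acc d
      by_cases h1 : c = '<'
      · simp [cleansingInner, machine, h1, ih]
      · by_cases h2 : c = '>'
        · simp [cleansingInner, machine, h1, h2, ih]
        · cases d with
          | false => simp [cleansingInner, machine, h1, h2, ih]
          | true => simp [cleansingInner, machine, h1, h2, ih]

lemma stripTags_cons_ne (c : Char) (cs : List Char) (h : c ≠ '<') :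
    stripTags (c :: cs) = c :: stripTags cs := by
  have hdw : (c :: cs).dropWhile (· ≠ '<') = cs.dropWhile (· ≠ '<') := by
    simp [List.dropWhile_cons, h]
  have htw : (c :: cs).takeWhile (· ≠ '<') = c :: cs.takeWhile (· ≠ '<') := by
    simp [List.takeWhile_cons, h]
  by_cases hnil : cs.dropWhile (· ≠ '<') = []
  · rw [stripTags, dif_pos (by rw [hdw]; exact hnil), htw,
      stripTags, dif_pos hnil]
  · rw [stripTags, dif_neg (by rw [hdw]; exact hnil), htw, hdw]
    conv_rhs => rw [stripTags, dif_neg hnil]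
    simp

lemma stripTags_cons_lt (cs : List Char) :
    stripTags ('<' :: cs) = stripTags ((cs.dropWhile (· ≠ '>')).drop 1) := by
  rw [stripTags, dif_neg (by simp [List.dropWhile_cons])]
  simp [List.takeWhile_cons, List.dropWhile_cons]

-- the two flag states of the machine, characterised through stripTags
lemma machine_eq (cs : List Char) :
    machine false cs = (stripTags cs).filter (fun c => c ≠ '>') ∧
    machine true cs = (stripTags ((cs.dropWhile (· ≠ '>')).drop 1)).filter (fun c => c ≠ '>') := by
  induction cs with
  | nil => simp [machine, stripTags]
  | cons c cs ih =>
      constructor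
      · by_cases h1 : c = '<'
        · subst h1
          rw [machine]; simp only [if_pos rfl]
          rw [stripTags_cons_lt]
          exact ih.2
        · by_cases h2 : c = '>'
          · subst h2
            rw [machine]
            simp only [if_neg h1, if_pos rfl]
            rw [stripTags_cons_ne _ _ h1]
            simpa using ih.1
          · rw [machine]
            simp only [if_neg h1, if_neg h2, if_neg (Bool.false_ne_true)]
            rw [stripTags_cons_ne _ _ h1]
            rw [List.filter_cons]
            simp only [h2, ne_eq, not_false_iff, decide_true, if_true]
            exact congrArg _ ih.1
      · by_cases h2 : c = '>'
        · subst h2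
          rw [machine]
          simp only [if_neg (by decide : ('>' : Char) ≠ '<'), if_pos rfl]
          simpa using ih.1
        · rw [machine]
          have hdw : ((c :: cs).dropWhile (· ≠ '>')).drop 1
              = ((cs.dropWhile (· ≠ '>')).drop 1) := by
            simp [List.dropWhile_cons, h2]
          by_cases h1 : c = '<'
          · subst h1
            simp only [if_pos rfl]
            rw [hdw]; exact ih.2
          · simp only [if_neg h1, if_neg h2, if_pos rfl]
            rw [hdw]; exact ih.2

lemma per_string (s : String) :
    String.mk (s.toList.foldl cleansingInner ([], false)).1
      = String.mk ((stripTags s.toList).filter (fun c => c ≠ '>')) := by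
  rw [foldl_inner]
  simp [(machine_eq s.toList).1]

-- ===== VERDICT (by name: the statement is the Claim_ definition above) =====
theorem cleansing_spec : Claim_equal_cleansing := by
  intro inputs _
  unfold Spec_cleansing cleansing cleansing_alt
  rw [PySem.List.foldl_append_singleton_eq_map]
  exact List.map_congr_left (fun s _ => per_string s)
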